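-- pv_equiv track=rewrite | github.com/maucarrui/advent-of-code | 2015/01/solution.py | get_floor
-- ===== SOURCE A (Python) =====
-- def get_floor(instruction_str):
--     """Returns the floor Santa must get to.
--
--     Parameters
--     ----------
--     instruction_str : string
--         The instructions that determine to which floor Santa must go.
--
--     Return
--     ------
--     floor : int or None
--         The floor Santa must go, or None if an invalid character was found on
--         the instructions.
--     """
--     # Current floor.
--     floor = 0
--
--     # If the instruction is empty, return the current floor.
--     if len(instruction_str) == 0:
--         return floor
--
--     # Otherwise, traverse each character in the string and move accordingly.
--     for c in instruction_str:
--         if c == "(":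
--             floor += 1
--         elif c == ")":
--             floor -= 1
--         else:
--             # If you find a char different from "(" or ")", return None.
--             return None
--
--     # When finished following the instructions, return the current floor.
--     return floor
-- ===== SOURCE B (Python) =====
-- def get_floor(instruction_str):
--     """Validate first, then compute the floor with two library counts."""
--     if any(c not in "()" for c in instruction_str):
--         return None
--     return instruction_str.count("(") - instruction_str.count(")")
-- ===== Notes on version B (the rewrite author's own statement) =====
-- stated objective: idiomatic
-- what changed: Replaces the fused counting-with-early-return loop by a separate validity check followed by two library str.count calls.
import Mathlib
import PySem

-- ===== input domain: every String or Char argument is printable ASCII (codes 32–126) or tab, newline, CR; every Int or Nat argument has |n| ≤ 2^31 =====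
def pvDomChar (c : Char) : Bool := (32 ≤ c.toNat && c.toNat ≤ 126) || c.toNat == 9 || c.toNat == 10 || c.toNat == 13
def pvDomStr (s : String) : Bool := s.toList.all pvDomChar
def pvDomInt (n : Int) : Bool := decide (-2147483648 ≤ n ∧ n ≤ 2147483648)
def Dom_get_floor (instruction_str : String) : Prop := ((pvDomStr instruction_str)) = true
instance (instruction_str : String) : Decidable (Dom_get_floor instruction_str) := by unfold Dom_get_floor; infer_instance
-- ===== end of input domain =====

-- B replaces A's fused counting loop with an early return by a separate validity
-- check followed by two library str.count calls (idiomatic; same O(n) cost).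


-- ===== PORT A =====
-- the 'for c in instruction_str' loop with its early 'return None'
def getFloorLoop : List Char → Int → Option Int
  | [], floor => some floor
  | c :: rest, floor =>
    if c = '(' then getFloorLoop rest (floor + 1)
    else if c = ')' then getFloorLoop rest (floor - 1)
    else none

def get_floor (instruction_str : String) : Option Int :=
  let floor : Int := 0
  if PySem.Str.len instruction_str = 0 then some floor
  else getFloorLoop instruction_str.toList floor

-- ===== PORT B =====
def get_floor_alt (instruction_str : String) : Option Int :=
  if instruction_str.toList.any (fun c => !("()".toList.contains c)) then none
  else some ((PySem.Str.count instruction_str "(" : Int) - (PySem.Str.count instruction_str ")" : Int))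

-- ===== PRECONDITION & SPEC =====
def Spec_get_floor (instruction_str : String) (out : Option Int) : Prop := out = get_floor_alt instruction_str
instance (instruction_str : String) (out : Option Int) : Decidable (Spec_get_floor instruction_str out) := by unfold Spec_get_floor; infer_instance

-- ===== CLAIM (what is proved, stated in full; the proofs are below) =====
def Claim_equal_get_floor : Prop := ∀ (instruction_str : String), Dom_get_floor instruction_str → Spec_get_floor instruction_str (get_floor instruction_str)

-- ===== LEMMAS AND PROOFS =====

-- single-character substring count is the element count
theorem chars_count_singleton (c : Char) (l : List Char) :
    PySem.Chars.count l [c] = l.count c := by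
  have go : ∀ (l : List Char) (fuel acc : Nat), l.length ≤ fuel →
      PySem.Chars.count.go [c] fuel l acc = acc + l.count c := by
    intro l
    induction l with
    | nil => intro fuel acc _; cases fuel <;> simp [PySem.Chars.count.go]
    | cons h t ih =>
      intro fuel acc hle
      cases fuel with
      | zero => simp at hle
      | succ n =>
        simp only [PySem.Chars.count.go, List.isPrefixOf]
        by_cases hc : h = c
        · simp [hc, ih n (acc + 1) (by simpa using hle), List.count_cons]
          omega
        · have hcb : (c == h) = false := by simp [Ne.symm hc]
          simp [hcb, ih n acc (by simpa using hle), List.count_cons, hc]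
  simp [PySem.Chars.count, go l l.length 0 le_rfl]

-- characterisation of A's loop
theorem getFloorLoop_eq (l : List Char) (f : Int) :
    getFloorLoop l f =
      if l.any (fun c => !(List.contains ['(', ')'] c)) then none
      else some (f + (l.count '(' : Int) - (l.count ')' : Int)) := by
  induction l generalizing f with
  | nil => simp [getFloorLoop]
  | cons h t ih =>
    simp only [getFloorLoop]
    have hm : ∀ c : Char, (List.contains ['(', ')'] c) = (decide (c = '(') || decide (c = ')')) := by
      intro c
      simp only [List.contains_cons, List.contains_nil, Bool.or_false]
      by_cases h1 : c = '(' <;> by_cases h2 : c = ')' <;> simp [h1, h2]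
    by_cases h1 : h = '('
    · simp [h1, ih, hm, List.count_cons]
      split_ifs <;> simp <;> push_cast <;> ring
    · by_cases h2 : h = ')'
      · simp [h1, h2, ih, hm, List.count_cons]
        split_ifs <;> simp <;> push_cast <;> ring
      · simp [h1, h2, hm]

-- ===== VERDICT (by name: the statement is the Claim_ definition above) =====
theorem get_floor_spec : Claim_equal_get_floor := by
  intro s _
  unfold Spec_get_floor get_floor get_floor_alt
  have hp : ("(" : String).toList = ['('] := rfl
  have hq : (")" : String).toList = [')'] := rfl
  have hpq : ("()" : String).toList = ['(', ')'] := rfl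
  simp only [PySem.Str.count_eq, PySem.Str.len_eq, hp, hq, hpq,
    chars_count_singleton, getFloorLoop_eq]
  rcases hl : s.toList with _ | ⟨c, t⟩
  · simp
  · have hne : ((c :: t).length : Int) ≠ 0 := by simp only [List.length_cons]; push_cast; omega
    rw [if_neg hne]
    split_ifs with h
    · rfl
    · simp
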